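-- pv_equiv track=rewrite | github.com/emecoding/jokc | jokc.py | functionHasBrackets
-- ===== SOURCE A (Python) =====
-- def functionHasBrackets(function):
--     brackets = 0
--     for i in function:
--         if i == "(": brackets += 1
--         elif i == ")":
--             brackets += 1
--             break
--
--     if brackets == 2: return True
--     else: return False
-- ===== SOURCE B (Python) =====
-- def functionHasBrackets(function):
--     idx = function.find(')')
--     if idx == -1:
--         return False
--     return function[:idx].count('(') == 1
-- ===== Notes on version B (the rewrite author's own statement) =====
-- stated objective: simpler
-- what changed: Replaces A's per-character accumulating scan-with-break by a two-phase find-then-count (locate the first closing bracket, then count opening brackets in the prefix), done by C-level str.find/str.count instead of a Python-level loop.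
-- intended difference: On strings containing no ')' but exactly two '(' (e.g. '((') A returns True because its counter happens to reach 2 without ever seeing a closing bracket, while B returns False; a string with no closing bracket has no matching bracket pair, so False is intended. — e.g. on functionHasBrackets("(("): A returns true, B returns false
import Mathlib
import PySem

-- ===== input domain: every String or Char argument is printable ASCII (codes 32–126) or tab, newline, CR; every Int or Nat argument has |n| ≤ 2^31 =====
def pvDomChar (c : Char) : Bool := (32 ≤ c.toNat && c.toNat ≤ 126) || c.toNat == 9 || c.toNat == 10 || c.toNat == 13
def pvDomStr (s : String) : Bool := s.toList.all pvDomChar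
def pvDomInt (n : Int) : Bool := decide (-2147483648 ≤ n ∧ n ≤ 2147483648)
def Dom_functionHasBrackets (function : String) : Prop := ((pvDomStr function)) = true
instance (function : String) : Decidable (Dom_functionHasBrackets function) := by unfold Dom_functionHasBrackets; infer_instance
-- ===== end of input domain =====

-- B changes A's single accumulating scan-with-break into find-first-')' then count-'('-in-prefix
-- (simpler decomposition); on strings with no ')' and exactly two '(' A accidentally returns True, B returns False (see D_).

-- ===== PORT A =====
-- the for-loop with break: state = brackets; break is modelled by returning immediately
def fhbLoop : List Char → Nat → Nat
  | [], brackets => brackets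
  | c :: rest, brackets =>
      if c = '(' then fhbLoop rest (brackets + 1)
      else if c = ')' then brackets + 1          -- += 1 then break
      else fhbLoop rest brackets

def functionHasBrackets (function : String) : Bool :=
  decide (fhbLoop function.toList 0 = 2)

-- ===== PORT B =====
def functionHasBrackets_alt (function : String) : Bool :=
  let idx := PySem.Str.find function ")"
  if idx = -1 then false
  else decide (PySem.Str.count (PySem.Str.slice function none (some idx)) "(" = 1)

-- ===== PRECONDITION & SPEC =====
-- On strings containing no ')' but exactly two '(' (e.g. "(("), A returns true because its counter
-- happens to reach 2 without ever seeing a closing bracket, while B returns false; a string with no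
-- closing bracket has no matching bracket pair, so false is the intended value.
def D_functionHasBrackets (function : String) : Prop :=
  ')' ∉ function.toList ∧ function.toList.count '(' = 2
instance (function : String) : Decidable (D_functionHasBrackets function) := by
  unfold D_functionHasBrackets; infer_instance

def Spec_functionHasBrackets (function : String) (out : Bool) : Prop :=
  ¬ D_functionHasBrackets function → out = functionHasBrackets_alt function
instance (function : String) (out : Bool) : Decidable (Spec_functionHasBrackets function out) := by
  unfold Spec_functionHasBrackets; infer_instance

def pvDiffWitness_functionHasBrackets : String := "(("
def pvDiffWitnessOut_functionHasBrackets : Bool × Bool := (true, false)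

-- ===== CLAIM (what is proved, stated in full; the proofs are below) =====
def Claim_unchanged_functionHasBrackets : Prop := ∀ (function : String), Dom_functionHasBrackets function → Spec_functionHasBrackets function (functionHasBrackets function)
def Claim_changed_functionHasBrackets : Prop := Dom_functionHasBrackets (pvDiffWitness_functionHasBrackets) ∧ D_functionHasBrackets (pvDiffWitness_functionHasBrackets) ∧ functionHasBrackets (pvDiffWitness_functionHasBrackets) = pvDiffWitnessOut_functionHasBrackets.1 ∧ functionHasBrackets_alt (pvDiffWitness_functionHasBrackets) = pvDiffWitnessOut_functionHasBrackets.2 ∧ pvDiffWitnessOut_functionHasBrackets.1 ≠ pvDiffWitnessOut_functionHasBrackets.2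
def Claim_exact_functionHasBrackets : Prop := ∀ (function : String), Dom_functionHasBrackets function → D_functionHasBrackets function → functionHasBrackets function ≠ functionHasBrackets_alt function

-- ===== LEMMAS AND PROOFS =====

-- A's loop: count '(' up to (excluding) the first ')', +1 if a ')' exists; plain count otherwise
theorem fhbLoop_eq (cs : List Char) (b : Nat) :
    fhbLoop cs b =
      b + (if ')' ∈ cs then (cs.takeWhile (· ≠ ')')).count '(' + 1 else cs.count '(') := by
  induction cs generalizing b with
  | nil => simp [fhbLoop]
  | cons c rest ih =>
    by_cases hc : c = '('
    · subst hc
      simp only [fhbLoop, ih, List.mem_cons, List.takeWhile_cons, List.count_cons]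
      split_ifs with h1 h2 h3 <;> simp_all <;> omega
    · by_cases hcr : c = ')'
      · subst hcr; simp [fhbLoop, hc]
      · simp only [fhbLoop, if_neg hc, if_neg hcr, ih, List.mem_cons, List.count_cons]
        rw [List.takeWhile_cons_of_pos (by simp [hcr])]
        have hor : (')' = c ∨ ')' ∈ rest) ↔ ')' ∈ rest := by
          constructor
          · rintro (h | h)
            · exact absurd h.symm hcr
            · exact h
          · exact Or.inr
        rw [if_congr hor rfl rfl]
        have hnc : ¬ ('(' = c) := fun h => hc h.symm
        split_ifs with h1 <;> simp_all

-- PySem single-character substring count is List.count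
theorem count_go_single (c : Char) (l : List Char) (fuel : Nat) (acc : Nat)
    (h : l.length ≤ fuel) :
    PySem.Chars.count.go [c] fuel l acc = acc + l.count c := by
  induction l generalizing fuel acc with
  | nil => cases fuel <;> simp [PySem.Chars.count.go]
  | cons x t ih =>
    cases fuel with
    | zero => simp at h
    | succ n =>
      simp only [List.length_cons, Nat.succ_le_succ_iff] at h
      by_cases hx : c = x
      · subst hx
        simp [PySem.Chars.count.go, List.isPrefixOf, ih _ _ h]
        omega
      · have hpf : ([c].isPrefixOf (x :: t)) = false := by
          simp [List.isPrefixOf, hx]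
        simp [PySem.Chars.count.go, hpf, ih _ _ h, Ne.symm hx]

theorem chars_count_single (s : List Char) (c : Char) :
    PySem.Chars.count s [c] = s.count c := by
  simp [PySem.Chars.count, count_go_single c s s.length 0 le_rfl]

-- a one-character list is an infix iff the character occurs
theorem singleton_infix_iff (c : Char) (l : List Char) : [c] <:+: l ↔ c ∈ l := by
  constructor
  · intro h; exact h.mem (by simp)
  · intro h
    obtain ⟨s, t, rfl⟩ := List.append_of_mem h
    exact ⟨s, t, by simp⟩

-- take up to the first occurrence of ')' is takeWhile (· ≠ ')')
theorem take_eq_takeWhile (cs : List Char) (k : Nat)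
    (hk : cs[k]? = some ')') (hmin : ∀ i < k, cs[i]? ≠ some ')') :
    cs.take k = cs.takeWhile (· ≠ ')') := by
  induction cs generalizing k with
  | nil => simp at hk
  | cons c rest ih =>
    cases k with
    | zero =>
      simp only [List.getElem?_cons_zero, Option.some.injEq] at hk
      simp [hk]
    | succ n =>
      have hc : c ≠ ')' := by
        have := hmin 0 (Nat.succ_pos n); simpa using this
      simp only [List.getElem?_cons_succ] at hk
      have hmin' : ∀ i < n, rest[i]? ≠ some ')' := by
        intro i hi
        have := hmin (i + 1) (by omega); simpa using this
      simp [hc, ih n hk hmin']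

theorem functionHasBrackets_eq_of_not_D (function : String)
    (hD : ¬ D_functionHasBrackets function) :
    functionHasBrackets function = functionHasBrackets_alt function := by
  unfold functionHasBrackets functionHasBrackets_alt
  have hSF : PySem.Str.find function ")" = PySem.Chars.find function.toList [')'] := by
    simp
  rw [hSF]
  by_cases hfind : PySem.Chars.find function.toList [')'] = -1
  · -- no ')' in the string
    have hni : ¬ ([')'] <:+: function.toList) :=
      (PySem.Chars.find_eq_neg_one_iff (s := function.toList) (sub := [')'])).mp hfind
    have hnm : ')' ∉ function.toList := fun h => hni ((singleton_infix_iff _ _).mpr h)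
    have hcnt : function.toList.count '(' ≠ 2 := fun h => hD ⟨hnm, h⟩
    simp [hfind, fhbLoop_eq, hnm, hcnt]
  · -- ')' occurs; find points at its first occurrence
    have h0 : (0:Int) ≤ PySem.Chars.find function.toList [')'] := by
      have := PySem.Chars.neg_one_le_find (s := function.toList) (sub := [')'])
      omega
    obtain ⟨hpre, hminp⟩ :=
      PySem.Chars.find_spec (s := function.toList) (sub := [')']) h0
    set k : Nat := (PySem.Chars.find function.toList [')']).toNat with hkdef
    -- function.toList[k]? = some ')'
    obtain ⟨t, ht⟩ := hpre
    have hdropk : function.toList.drop k = ')' :: t := by simpa using ht.symm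
    have hk_lt : k < function.toList.length := by
      by_contra hge
      rw [List.drop_eq_nil_of_le (by omega)] at hdropk
      simp at hdropk
    have hget : function.toList[k]? = some ')' := by
      have := congrArg List.head? hdropk
      rwa [List.head?_drop] at this
    have hmin : ∀ i < k, function.toList[i]? ≠ some ')' := by
      intro i hi hgi
      apply hminp i (by omega)
      have hi_lt : i < function.toList.length := by
        by_contra hge
        rw [List.getElem?_eq_none_iff.mpr (by omega)] at hgi
        simp at hgi
      refine ⟨function.toList.drop (i+1), ?_⟩
      rw [List.getElem?_eq_getElem hi_lt] at hgi
      have hgi' : function.toList[i] = ')' := by simpa using hgi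
      have hdi : function.toList.drop i = ')' :: function.toList.drop (i+1) := by
        rw [List.drop_eq_getElem_cons hi_lt, hgi']
      simp [hdi]
    have hmem : ')' ∈ function.toList := List.mem_of_getElem? hget
    have htake : function.toList.take k = function.toList.takeWhile (· ≠ ')') :=
      take_eq_takeWhile function.toList k hget hmin
    rw [if_neg hfind, fhbLoop_eq, if_pos hmem]
    have hcount : PySem.Str.count
        (PySem.Str.slice function none (some (PySem.Chars.find function.toList [')']))) "("
        = (function.toList.takeWhile (· ≠ ')')).count '(' := by
      rw [PySem.Str.count_eq]
      have hsl : (PySem.Str.slice function none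
          (some (PySem.Chars.find function.toList [')']))).toList
          = function.toList.take k := by
        have := PySem.List.slice_to (xs := function.toList)
          (b := PySem.Chars.find function.toList [')']) h0
        simp [PySem.Str.slice, this, hkdef]
      rw [hsl, htake]
      have h1 : ("(" : String).toList = ['('] := rfl
      rw [h1, chars_count_single]
    rw [hcount]
    simp only [Nat.zero_add, decide_eq_decide]
    omega

-- ===== VERDICT (by name: the statement is the Claim_ definition above) =====
theorem functionHasBrackets_spec : Claim_unchanged_functionHasBrackets := by
  intro function _ hD
  exact functionHasBrackets_eq_of_not_D function hD

theorem functionHasBrackets_changed : Claim_changed_functionHasBrackets := by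
  unfold Claim_changed_functionHasBrackets; decide

theorem functionHasBrackets_tight : Claim_exact_functionHasBrackets := by
  intro function _ hD
  obtain ⟨hnm, hcnt⟩ := hD
  have hni : ¬ ([')'] <:+: function.toList) := fun h => hnm ((singleton_infix_iff _ _).mp h)
  have hfind : PySem.Chars.find function.toList [')'] = -1 :=
    (PySem.Chars.find_eq_neg_one_iff (s := function.toList) (sub := [')'])).mpr hni
  have hA : functionHasBrackets function = true := by
    simp [functionHasBrackets, fhbLoop_eq, hnm, hcnt]
  have hB : functionHasBrackets_alt function = false := by
    simp [functionHasBrackets_alt, hfind]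
  simp [hA, hB]
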